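-- pv_equiv track=rewrite | github.com/math4raujo/Projetos-e-codigos | Beecrowd/conversao_simples_de_base.py | coeficientes
-- ===== SOURCE A (Python) =====
-- def coeficientes(exps):
--     """
--     Recebe uma lista com valores duplicados de expoentes de um número na base 16 e retorna uma lista com os algarismos
--     deste número na base 16 (hexadecimal).
--     :param exps: list
--     :return: coefs: list
--     """
--     tot_n = len(exps)
--     coefs = []
--     for i in range(tot_n):
--         contaj = 0
--         for j in range(i, tot_n):
--             if exps[j] == exps[i] and exps[j] != exps[i-1]:
--                 contaj += 1
--         if contaj > 0:
--             coefs.append(contaj)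
--
--     if len(coefs) == 0:
--         coefs.append(len(exps))
--
--     return coefs
-- ===== SOURCE B (Python) =====
-- def coeficientes(exps):
--     """One pass with a precomputed count dict (O(n)) instead of A's nested scans (O(n^2)).
--     Unlike A, position 0 is always treated as a run start (A's exps[i-1] wraps to exps[-1])."""
--     remaining = {}
--     for x in exps:
--         remaining[x] = remaining.get(x, 0) + 1
--     coefs = []
--     prev = None
--     for x in exps:
--         if prev is None or x != prev:
--             coefs.append(remaining[x])
--         remaining[x] -= 1
--         prev = x
--     if not coefs:
--         coefs.append(len(exps))
--     return coefs
-- ===== Notes on version B (the rewrite author's own statement) =====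
-- stated objective: faster
-- what changed: Replaces A's nested index scans with one pass over the list that consults a precomputed per-value count dict (decremented as it advances), so each run start emits its forward count directly.
-- intended difference: On lists of length at least 2 whose first and last elements are equal but which are not constant, A's test exps[j] != exps[i-1] wraps at i=0 to the last element and silently drops the first run's count, while B treats position 0 as a run start and additionally returns that run's forward count, which is the intended per-run value. — e.g. on coeficientes([1, 2, 1]): A returns [1, 1], B returns [2, 1, 1]
import Mathlib
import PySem

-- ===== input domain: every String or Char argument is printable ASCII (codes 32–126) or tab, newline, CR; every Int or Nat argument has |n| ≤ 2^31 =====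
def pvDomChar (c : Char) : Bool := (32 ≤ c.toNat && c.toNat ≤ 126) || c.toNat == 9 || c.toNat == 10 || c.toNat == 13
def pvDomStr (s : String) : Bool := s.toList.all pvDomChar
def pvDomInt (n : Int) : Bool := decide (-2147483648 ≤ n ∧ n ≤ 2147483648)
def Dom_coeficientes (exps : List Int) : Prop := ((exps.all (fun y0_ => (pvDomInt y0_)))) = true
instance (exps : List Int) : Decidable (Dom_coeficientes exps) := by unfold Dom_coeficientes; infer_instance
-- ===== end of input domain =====

-- B replaces A's nested index scans by one pass with a precomputed count dict; on lists whose
-- first and last element coincide but which are not constant, A's exps[i-1] wraps at i=0 and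
-- drops the first run's count — B returns it (intended difference, see D_coeficientes below).

-- ===== PORT A =====
-- inner loop 'for j in range(i, tot_n)'; all indices j, i are in range and i-1 ≥ -1 wraps
-- Python-style to the last element, so pyGetD is exact here
def contaLoop (exps : List Int) (i : Int) : Int :=
  (PySem.List.pyRange i (exps.length : Int) 1).foldl
    (fun contaj j =>
      if PySem.List.pyGetD exps j 0 = PySem.List.pyGetD exps i 0 ∧
         PySem.List.pyGetD exps j 0 ≠ PySem.List.pyGetD exps (i-1) 0
      then contaj + 1 else contaj) 0

def coeficientes (exps : List Int) : List Int :=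
  let totn : Int := (exps.length : Int)
  let coefs := (PySem.List.pyRange 0 totn 1).foldl
    (fun coefs i =>
      let contaj := contaLoop exps i
      if contaj > 0 then coefs ++ [contaj] else coefs) []
  if coefs.length = 0 then coefs ++ [(exps.length : Int)] else coefs

-- ===== PORT B =====
-- 'remaining[x] = remaining.get(x, 0) + 1'
def buildCounts (exps : List Int) : PySem.Dict Int Int :=
  exps.foldl (fun d x => d.insert x (d.getD x 0 + 1)) PySem.Dict.empty

-- loop state (remaining, coefs, prev); 'if prev is None or x != prev: coefs.append(remaining[x])'
def bStep (st : PySem.Dict Int Int × List Int × Option Int) (x : Int) :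
    PySem.Dict Int Int × List Int × Option Int :=
  let coefs := if st.2.2 = none ∨ some x ≠ st.2.2 then st.2.1 ++ [st.1.getD x 0] else st.2.1
  (st.1.insert x (st.1.getD x 0 - 1), coefs, some x)

def coeficientes_alt (exps : List Int) : List Int :=
  let st := exps.foldl bStep (buildCounts exps, [], none)
  let coefs := st.2.1
  if coefs = [] then coefs ++ [(exps.length : Int)] else coefs

-- ===== PRECONDITION & SPEC =====
-- On lists of length ≥ 2 whose first and last elements are equal but which are not constant,
-- A's test exps[j] != exps[i-1] wraps at i=0 to the LAST element and silently drops the first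
-- run's count; B treats position 0 as a run start and returns its forward count, the intended value.
def D_coeficientes (exps : List Int) : Prop :=
  2 ≤ exps.length ∧ exps.head? = exps.getLast? ∧ ∃ x ∈ exps, exps.head? ≠ some x
instance (exps : List Int) : Decidable (D_coeficientes exps) := by
  unfold D_coeficientes; infer_instance

def Spec_coeficientes (exps : List Int) (out : List Int) : Prop :=
  ¬ D_coeficientes exps → out = coeficientes_alt exps
instance (exps : List Int) (out : List Int) : Decidable (Spec_coeficientes exps out) := by
  unfold Spec_coeficientes; infer_instance

def pvDiffWitness_coeficientes : List Int := [1, 2, 1]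
def pvDiffWitnessOut_coeficientes : (List Int) × (List Int) := ([1, 1], [2, 1, 1])

-- ===== CLAIM (what is proved, stated in full; the proofs are below) =====
def Claim_unchanged_coeficientes : Prop :=
  ∀ (exps : List Int), Dom_coeficientes exps → Spec_coeficientes exps (coeficientes exps)
def Claim_changed_coeficientes : Prop :=
  Dom_coeficientes (pvDiffWitness_coeficientes) ∧ D_coeficientes (pvDiffWitness_coeficientes) ∧
  coeficientes (pvDiffWitness_coeficientes) = pvDiffWitnessOut_coeficientes.1 ∧
  coeficientes_alt (pvDiffWitness_coeficientes) = pvDiffWitnessOut_coeficientes.2 ∧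
  pvDiffWitnessOut_coeficientes.1 ≠ pvDiffWitnessOut_coeficientes.2
def Claim_exact_coeficientes : Prop :=
  ∀ (exps : List Int), Dom_coeficientes exps → D_coeficientes exps →
    coeficientes exps ≠ coeficientes_alt exps

-- ===== LEMMAS AND PROOFS =====

-- reference shape shared by both proofs: per run start, 1 + (count of the value in the rest)
def core (prev : Option Int) : List Int → List Int
  | [] => []
  | x :: t =>
      if some x = prev then core (some x) t
      else (1 + (t.count x : Int)) :: core (some x) t

theorem core_nil_iff (prev : Option Int) (l : List Int) : core prev l = [] ↔
    ∀ x ∈ l, some x = prev := by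
  induction l generalizing prev with
  | nil => simp [core]
  | cons x t ih =>
      simp only [core]
      constructor
      · intro h
        split at h
        · next heq =>
            intro y hy
            rcases List.mem_cons.mp hy with rfl | hy
            · exact heq
            · exact ((ih (some x)).mp h y hy).trans heq
        · simp at h
      · intro h
        have hx : some x = prev := h x (by simp)
        rw [if_pos hx, hx]
        exact (ih prev).mpr fun y hy => h y (by simp [hy])

theorem buildCounts_getD_aux (l : List Int) : ∀ (d : PySem.Dict Int Int) (v : Int),
    (l.foldl (fun d x => d.insert x (d.getD x 0 + 1)) d).getD v 0
      = d.getD v 0 + (l.count v : Int) := by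
  induction l with
  | nil => simp
  | cons x t ih =>
      intro d v
      simp only [List.foldl_cons, ih, PySem.Dict.getD_insert, List.count_cons]
      by_cases hv : v = x <;> simp [hv] <;> omega

theorem buildCounts_getD (exps : List Int) (v : Int) :
    (buildCounts exps).getD v 0 = (exps.count v : Int) := by
  simp [buildCounts, buildCounts_getD_aux]

theorem bFold_eq (l : List Int) : ∀ (d : PySem.Dict Int Int) (acc : List Int) (prev : Option Int),
    (∀ x, d.getD x 0 = (l.count x : Int)) →
    (l.foldl bStep (d, acc, prev)).2.1 = acc ++ core prev l := by
  induction l with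
  | nil => intro d acc prev _; simp [core]
  | cons x t ih =>
      intro d acc prev hd
      have hd' : ∀ y, (d.insert x (d.getD x 0 - 1)).getD y 0 = (t.count y : Int) := by
        intro y
        rw [PySem.Dict.getD_insert]
        by_cases hy : y = x
        · subst hy; rw [hd y, List.count_cons_self]; push_cast; ring_nf; simp
        · rw [if_neg hy, hd y, List.count_cons_of_ne]
          exact fun h => hy (by exact_mod_cast h.symm)
      simp only [List.foldl_cons, bStep]
      by_cases hx : some x = prev
      · have hcond : ¬ (prev = none ∨ some x ≠ prev) := by simp [← hx]
        rw [if_neg hcond, ih _ _ _ hd']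
        simp [core, hx]
      · rw [if_pos (Or.inr hx), ih _ _ _ hd', hd x, List.count_cons_self]
        simp only [core, if_neg hx]
        push_cast
        simp [List.append_assoc]
        ring_nf

-- B's result, for nonempty input
theorem alt_eq_core (exps : List Int) (h : exps ≠ []) :
    coeficientes_alt exps = core none exps := by
  unfold coeficientes_alt
  simp only []
  rw [bFold_eq exps _ _ _ (buildCounts_getD exps)]
  simp only [List.nil_append]
  rw [if_neg]
  intro hc
  rcases List.exists_mem_of_ne_nil exps h with ⟨x, hx⟩
  have := (core_nil_iff none exps).mp hc x hx
  simp at this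

-- A's inner loop: forward count of exps[i] in exps[i:], gated by exps[i] != exps[i-1]
theorem contaLoop_eq (exps : List Int) (i : Int) (h0 : 0 ≤ i) :
    contaLoop exps i =
      if PySem.List.pyGetD exps i 0 ≠ PySem.List.pyGetD exps (i-1) 0
      then ((exps.drop i.toNat).count (PySem.List.pyGetD exps i 0) : Int) else 0 := by
  unfold contaLoop
  rw [PySem.List.foldl_pyRange_pyGetD' exps 0
      (fun c x => if x = PySem.List.pyGetD exps i 0 ∧ x ≠ PySem.List.pyGetD exps (i-1) 0
                  then c + 1 else c) 0 h0]
  set A := PySem.List.pyGetD exps i 0 with hA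
  set P := PySem.List.pyGetD exps (i-1) 0 with hP
  have hcnt := PySem.List.foldl_count_if
      (fun x => decide (x = A ∧ x ≠ P)) (exps.drop i.toNat) 0
  simp only [decide_eq_true_eq] at hcnt
  rw [hcnt]
  by_cases hAP : A = P
  · simp [hAP]
  · have : (List.countP (fun x => decide (x = A ∧ x ≠ P)) (exps.drop i.toNat))
        = (exps.drop i.toNat).count A := by
      rw [List.count_eq_countP]
      apply List.countP_congr
      intro x _
      by_cases hx : x = A <;> simp [hx, hAP]
    rw [this]
    simp [hAP]

-- the same at a Nat index k ≥ 1 (no wraparound)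
theorem contaLoop_nat (exps : List Int) (k : Nat) (h1 : 1 ≤ k) (hk : k < exps.length) :
    contaLoop exps (k : Int) =
      if exps[k]'hk ≠ exps.getD (k-1) 0
      then ((exps.drop k).count (exps[k]'hk) : Int) else 0 := by
  rw [contaLoop_eq exps (k : Int) (by positivity)]
  have h1' : ((k:Int) - 1) = ((k-1 : Nat) : Int) := by omega
  simp only [h1', PySem.List.pyGetD_natCast, Int.toNat_natCast]
  rw [List.getD_eq_getElem exps 0 hk]

-- A's filtered index scan from k ≥ 1 onwards equals core on the suffix
theorem coefs_suffix_aux (exps : List Int) : ∀ (m k : Nat), exps.length - k = m → 1 ≤ k →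
    k ≤ exps.length →
    ((PySem.List.pyRange (k : Int) (exps.length : Int) 1).filter
        (fun i => decide (contaLoop exps i > 0))).map (contaLoop exps)
      = core (some (exps.getD (k-1) 0)) (exps.drop k) := by
  intro m
  induction m with
  | zero =>
      intro k hm h1 hk
      have hk' : k = exps.length := by omega
      rw [PySem.List.pyRange_one_eq_nil (by omega)]
      simp [hk', core]
  | succ m ih =>
      intro k hm h1 hk
      have hklt : k < exps.length := by omega
      have hcons : PySem.List.pyRange (k : Int) (exps.length : Int) 1
          = (k : Int) :: PySem.List.pyRange ((k+1 : Nat) : Int) (exps.length : Int) 1 := by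
        rw [PySem.List.pyRange_one_cons (by exact_mod_cast hklt)]
        norm_num
      rw [hcons]
      have hdrop : exps.drop k = exps[k]'hklt :: exps.drop (k+1) :=
        List.drop_eq_getElem_cons hklt
      have hconta := contaLoop_nat exps k h1 hklt
      have hIH := ih (k+1) (by omega) (by omega) (by omega)
      simp only [Nat.add_sub_cancel] at hIH
      have hgd : exps.getD k 0 = exps[k]'hklt := List.getD_eq_getElem exps 0 hklt
      by_cases hne : exps[k]'hklt ≠ exps.getD (k-1) 0
      · have hmem : exps[k]'hklt ∈ exps.drop k := by
          rw [hdrop]; exact List.mem_cons_self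
        have hpos : contaLoop exps (k : Int) > 0 := by
          rw [hconta, if_pos hne]
          exact_mod_cast List.count_pos_iff.mpr hmem
        rw [List.filter_cons_of_pos (by simpa using hpos), List.map_cons, hIH]
        rw [hdrop]
        simp only [core]
        rw [if_neg (fun h => hne (Option.some.inj h))]
        rw [hconta, if_pos hne, hdrop, List.count_cons_self, hgd]
        push_cast
        ring_nf
      · rw [not_not] at hne
        have hzero : ¬ (contaLoop exps (k : Int) > 0) := by
          rw [hconta, if_neg (by simp [hne])]
          omega
        rw [List.filter_cons_of_neg (by simpa using hzero), hIH]
        rw [hdrop]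
        simp only [core]
        rw [if_pos (congrArg some hne), hgd]

theorem coefs_suffix (exps : List Int) (k : Nat) (h1 : 1 ≤ k) (hk : k ≤ exps.length) :
    ((PySem.List.pyRange (k : Int) (exps.length : Int) 1).filter
        (fun i => decide (contaLoop exps i > 0))).map (contaLoop exps)
      = core (some (exps.getD (k-1) 0)) (exps.drop k) :=
  coefs_suffix_aux exps _ k rfl h1 hk

-- A as a filtered index map with the empty-result fallback
theorem A_eq_filter (exps : List Int) :
    coeficientes exps =
      (if ((PySem.List.pyRange 0 (exps.length : Int) 1).filter
            (fun i => decide (contaLoop exps i > 0))).map (contaLoop exps) = []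
       then [(exps.length : Int)]
       else ((PySem.List.pyRange 0 (exps.length : Int) 1).filter
            (fun i => decide (contaLoop exps i > 0))).map (contaLoop exps)) := by
  unfold coeficientes
  simp only []
  rw [PySem.List.foldl_append_ite (fun i => contaLoop exps i > 0) (contaLoop exps)]
  simp only [List.nil_append, List.length_eq_zero_iff]
  by_cases hL : ((PySem.List.pyRange 0 (exps.length : Int) 1).filter
      (fun i => decide (contaLoop exps i > 0))).map (contaLoop exps) = [] <;>
    simp [hL]

-- constant head-to-tail: A's filter is empty
theorem conta_const_zero (h : Int) (t : List Int) (hconst : ∀ x ∈ h :: t, x = h)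
    (i : Int) (hi : i ∈ PySem.List.pyRange 0 ((h :: t).length : Int) 1) :
    ¬ (contaLoop (h :: t) i > 0) := by
  have hmem := PySem.List.mem_pyRange_one.mp hi
  have hin : PySem.Raise.InRange (h :: t).length i := by
    constructor <;> omega
  have hin' : PySem.Raise.InRange (h :: t).length (i - 1) := by
    have h1 : 1 ≤ ((h :: t).length : Int) := by simp
    constructor <;> omega
  have h1 : PySem.List.pyGetD (h :: t) i 0 = h :=
    hconst _ (PySem.List.pyGetD_mem _ 0 hin)
  have h2 : PySem.List.pyGetD (h :: t) (i - 1) 0 = h :=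
    hconst _ (PySem.List.pyGetD_mem _ 0 hin')
  rw [contaLoop_eq _ _ (by omega), h1, h2]
  simp

-- outside D_: A's filtered scan and B's pass both reduce to core
theorem main_core (exps : List Int) (hnD : ¬ D_coeficientes exps) :
    coeficientes exps = coeficientes_alt exps := by
  match exps with
  | [] => decide
  | h :: t =>
    rw [A_eq_filter, alt_eq_core _ (List.cons_ne_nil h t)]
    by_cases hconst : ∀ x ∈ h :: t, x = h
    · rw [if_pos]
      · have ht : ∀ x ∈ t, x = h := fun x hx => hconst x (List.mem_cons_of_mem h hx)
        simp only [core]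
        rw [if_neg (by simp)]
        rw [(core_nil_iff (some h) t).mpr (fun x hx => congrArg some (ht x hx))]
        have : t.count h = t.length := List.count_eq_length.mpr (fun b hb => (ht b hb).symm)
        simp [this]
        omega
      · rw [List.map_eq_nil_iff, List.filter_eq_nil_iff]
        intro i hi
        simpa using conta_const_zero h t hconst i hi
    · -- not constant: ¬D forces h ≠ getLast
      have htne : t ≠ [] := by rintro rfl; exact hconst (by simp)
      have hne : h ≠ (h :: t).getLast (List.cons_ne_nil h t) := by
        intro heq
        apply hnD
        refine ⟨?_, ?_, ?_⟩
        · have := List.length_pos_iff.mpr htne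
          simp only [List.length_cons]
          omega
        · rw [List.getLast?_eq_some_getLast (List.cons_ne_nil h t), ← heq, List.head?_cons]
        · simp only [not_forall] at hconst
          rcases hconst with ⟨x, hx, hxh⟩
          exact ⟨x, hx, by
            simp only [List.head?_cons]
            intro hh
            exact hxh (Option.some.inj hh).symm⟩
      have hlen : 0 < ((h :: t).length : Int) := by simp
      rw [PySem.List.pyRange_one_cons hlen]
      have hc0 : contaLoop (h :: t) 0 = ((h :: t).count h : Int) := by
        rw [contaLoop_eq _ 0 le_rfl]
        rw [show (0 : Int) - 1 = -1 by ring]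
        rw [PySem.List.pyGetD_neg_one _ _ (List.cons_ne_nil h t)]
        rw [PySem.List.pyGetD_zero_cons]
        rw [if_pos hne]
        simp
      have hpos : contaLoop (h :: t) 0 > 0 := by
        rw [hc0]
        have : 0 < (h :: t).count h := List.count_pos_iff.mpr (by simp)
        exact_mod_cast this
      rw [List.filter_cons_of_pos (by simpa using hpos), List.map_cons, if_neg (by simp)]
      have hsuf := coefs_suffix (h :: t) 1 le_rfl (by simp)
      norm_num at hsuf
      simp only [gt_iff_lt, List.length_cons, Nat.cast_add, Nat.cast_one, zero_add]
      rw [hsuf]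
      simp only [core]
      rw [if_neg (by simp)]
      congr 1
      rw [hc0, List.count_cons_self]
      push_cast
      ring

-- ===== VERDICT (by name: the statement is the Claim_ definition above) =====
theorem coeficientes_spec : Claim_unchanged_coeficientes := by
  intro exps _ hnD
  exact main_core exps hnD

theorem coeficientes_changed : Claim_changed_coeficientes := by
  unfold Claim_changed_coeficientes; decide

theorem coeficientes_tight : Claim_exact_coeficientes := by
  intro exps _ hD
  rcases hD with ⟨hlen, heq, x, hx, hxh⟩
  match exps with
  | h :: t =>
    have htne : t ≠ [] := by rintro rfl; simp at hlen
    have hhl : h = (h :: t).getLast (List.cons_ne_nil h t) := by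
      rw [List.getLast?_eq_some_getLast (List.cons_ne_nil h t), List.head?_cons] at heq
      exact Option.some.inj heq
    have hxh : x ≠ h := by
      intro hxe
      exact hxh (by rw [List.head?_cons, hxe])
    have hxt : x ∈ t := by
      rcases List.mem_cons.mp hx with rfl | hxt
      · exact absurd rfl hxh
      · exact hxt
    have hcoreA : ((PySem.List.pyRange 0 ((h :: t).length : Int) 1).filter
        (fun i => decide (contaLoop (h :: t) i > 0))).map (contaLoop (h :: t))
        = core (some h) t := by
      have hlen0 : (0 : Int) < ((h :: t).length : Int) := by simp
      rw [PySem.List.pyRange_one_cons hlen0]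
      have hc0 : ¬ (contaLoop (h :: t) 0 > 0) := by
        rw [contaLoop_eq _ 0 le_rfl]
        rw [show (0 : Int) - 1 = -1 by ring]
        rw [PySem.List.pyGetD_neg_one _ _ (List.cons_ne_nil h t), PySem.List.pyGetD_zero_cons]
        rw [if_neg (by simpa using hhl)]
        omega
      rw [List.filter_cons_of_neg (by simpa using hc0)]
      have hsuf := coefs_suffix (h :: t) 1 le_rfl (by simp)
      norm_num at hsuf
      simp only [gt_iff_lt, List.length_cons, Nat.cast_add, Nat.cast_one, zero_add]
      exact hsuf
    have hAne : core (some h) t ≠ [] := by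
      intro hc
      exact hxh (Option.some.inj ((core_nil_iff (some h) t).mp hc x hxt))
    rw [A_eq_filter, alt_eq_core _ (List.cons_ne_nil h t), hcoreA, if_neg hAne]
    simp only [core]
    rw [if_neg (by simp)]
    intro he
    have := congrArg List.length he
    simp at this
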